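-- pv_equiv track=rewrite | github.com/adityapatil123/hackerearth_practice | problems/very_cool_numbers.py | get_coolness_count_of_number
-- ===== SOURCE A (Python) =====
-- def get_coolness_count_of_number(number: int):
--     number_string = str(bin(number)[2:])
--     count = 0
--     # for idx in range(len(number_string)):
--     #     if number_string[idx: idx + substring_len] == substring:
--     #         count += 1
--     # return count
--     x_current_string = ""
--     for x in number_string:
--         if x == "1":
--             if x_current_string == "10":
--                 count += 1
--             x_current_string = "1"
--         else:
--             if x_current_string == "1":
--                 x_current_string += "0"
--             else:
--                 x_current_string = ""
--     return count
-- ===== SOURCE B (Python) =====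
-- def get_coolness_count_of_number(number: int):
--     s = str(bin(number)[2:])
--     return sum(1 for i in range(len(s) - 2) if s[i:i + 3] == "101")
-- ===== Notes on version B (the rewrite author's own statement) =====
-- stated objective: simpler
-- what changed: Replaces A's mutable finite-state machine (a string accumulator reset to '1' to allow overlap) with a direct sliding-window scan counting positions i where s[i:i+3] == '101'.
import Mathlib
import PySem

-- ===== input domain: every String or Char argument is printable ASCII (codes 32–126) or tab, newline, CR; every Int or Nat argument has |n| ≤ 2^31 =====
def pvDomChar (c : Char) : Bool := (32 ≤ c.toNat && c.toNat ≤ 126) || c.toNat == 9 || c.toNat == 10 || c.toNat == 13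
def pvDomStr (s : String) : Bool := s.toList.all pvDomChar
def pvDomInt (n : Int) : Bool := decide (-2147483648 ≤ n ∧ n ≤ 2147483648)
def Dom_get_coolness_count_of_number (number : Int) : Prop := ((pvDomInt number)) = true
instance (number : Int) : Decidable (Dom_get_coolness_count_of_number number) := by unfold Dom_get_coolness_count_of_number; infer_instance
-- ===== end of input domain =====

-- B replaces A's mutable finite-state machine by a direct sliding-window scan over the same binary string (objective: simpler).


-- ===== PORT A =====
-- state machine step: state = (count, x_current_string); the current string is kept as a List Char
def pvStepA (st : Int × List Char) (x : Char) : Int × List Char :=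
  if x = '1' then
    (if st.2 = ['1', '0'] then st.1 + 1 else st.1, ['1'])
  else
    if st.2 = ['1'] then (st.1, st.2 ++ ['0']) else (st.1, [])

def get_coolness_count_of_number (number : Int) : Int :=
  let number_string : String := PySem.Str.slice (PySem.Int.pyBin number) (some 2) none
  (number_string.toList.foldl pvStepA (0, [])).1

-- ===== PORT B =====
def get_coolness_count_of_number_alt (number : Int) : Int :=
  let s : String := PySem.Str.slice (PySem.Int.pyBin number) (some 2) none
  (PySem.List.pyRange 0 (PySem.Str.len s - 2) 1).foldl
    (fun acc i => if PySem.Str.slice s (some i) (some (i + 3)) = "101" then acc + 1 else acc) 0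

-- ===== PRECONDITION & SPEC =====
def Spec_get_coolness_count_of_number (number : Int) (out : Int) : Prop := out = get_coolness_count_of_number_alt number
instance (number : Int) (out : Int) : Decidable (Spec_get_coolness_count_of_number number out) := by unfold Spec_get_coolness_count_of_number; infer_instance

-- ===== CLAIM (what is proved, stated in full; the proofs are below) =====
def Claim_equal_get_coolness_count_of_number : Prop := ∀ (number : Int), Dom_get_coolness_count_of_number number → Spec_get_coolness_count_of_number number (get_coolness_count_of_number number)

-- ===== LEMMAS AND PROOFS =====
-- the common specification: number of (overlapping) windows equal to "101"
def pvCnt : List Char → Int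
  | [] => 0
  | x :: t => (if (x :: t).take 3 = ['1', '0', '1'] then 1 else 0) + pvCnt t

lemma pvCnt_cons (x : Char) (t : List Char) :
    pvCnt (x :: t) = (if (x :: t).take 3 = ['1', '0', '1'] then 1 else 0) + pvCnt t := rfl

lemma pvCnt_short (l : List Char) (h : l.length ≤ 2) : pvCnt l = 0 := by
  match l, h with
  | [], _ => rfl
  | [a], _ => simp [pvCnt]
  | [a, b], _ => simp [pvCnt]

lemma pvCnt_cons_ne_one (x : Char) (t : List Char) (hx : x ≠ '1') :
    pvCnt (x :: t) = pvCnt t := by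
  have h : ¬ (x :: t).take 3 = ['1', '0', '1'] := by
    intro h
    rw [List.take_succ_cons] at h
    injection h with h1 _
    exact hx h1
  rw [pvCnt_cons, if_neg h, zero_add]

-- A's machine invariant: the remaining matches are exactly the windows of cur ++ rest
lemma pvA_inv (l : List Char) (hl : ∀ c ∈ l, c = '0' ∨ c = '1') :
    ∀ (count : Int) (cur : List Char), cur = [] ∨ cur = ['1'] ∨ cur = ['1', '0'] →
      (l.foldl pvStepA (count, cur)).1 = count + pvCnt (cur ++ l) := by
  induction l with
  | nil =>
    intro count cur hcur
    rcases hcur with h | h | h <;> subst h <;> simp [pvCnt]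
  | cons x t ih =>
    intro count cur hcur
    have ht : ∀ c ∈ t, c = '0' ∨ c = '1' := fun c hc => hl c (by simp [hc])
    rcases hl x (by simp) with hx | hx <;> subst hx <;>
      rcases hcur with h | h | h <;> subst h
    · -- x = '0', cur = []
      rw [List.foldl_cons,
          show pvStepA (count, []) '0' = (count, []) from by simp [pvStepA],
          ih ht count [] (Or.inl rfl), List.nil_append, List.nil_append,
          pvCnt_cons_ne_one '0' t (by decide)]
    · -- x = '0', cur = ['1']
      rw [List.foldl_cons,
          show pvStepA (count, ['1']) '0' = (count, ['1', '0']) from by simp [pvStepA],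
          ih ht count ['1', '0'] (Or.inr (Or.inr rfl))]
      rfl
    · -- x = '0', cur = ['1', '0']
      rw [List.foldl_cons,
          show pvStepA (count, ['1', '0']) '0' = (count, []) from by simp [pvStepA],
          ih ht count [] (Or.inl rfl), List.nil_append]
      have e1 : pvCnt ('1' :: '0' :: '0' :: t) = pvCnt ('0' :: '0' :: t) := by
        rw [pvCnt_cons, if_neg (by simp), zero_add]
      rw [show ((['1', '0'] : List Char) ++ '0' :: t) = '1' :: '0' :: '0' :: t from rfl,
          e1, pvCnt_cons_ne_one '0' ('0' :: t) (by decide), pvCnt_cons_ne_one '0' t (by decide)]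
    · -- x = '1', cur = []
      rw [List.foldl_cons,
          show pvStepA (count, []) '1' = (count, ['1']) from by simp [pvStepA],
          ih ht count ['1'] (Or.inr (Or.inl rfl))]
      rfl
    · -- x = '1', cur = ['1']
      rw [List.foldl_cons,
          show pvStepA (count, ['1']) '1' = (count, ['1']) from by simp [pvStepA],
          ih ht count ['1'] (Or.inr (Or.inl rfl))]
      have h3 : ¬ ('1' :: '1' :: t).take 3 = ['1', '0', '1'] := by cases t <;> simp
      rw [show ((['1'] : List Char) ++ '1' :: t) = '1' :: '1' :: t from rfl,
          pvCnt_cons '1' ('1' :: t), if_neg h3, zero_add]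
      rfl
    · -- x = '1', cur = ['1', '0']
      rw [List.foldl_cons,
          show pvStepA (count, ['1', '0']) '1' = (count + 1, ['1']) from by simp [pvStepA],
          ih ht (count + 1) ['1'] (Or.inr (Or.inl rfl))]
      have h4 : pvCnt ('1' :: '0' :: '1' :: t) = 1 + pvCnt ('1' :: t) := by
        rw [pvCnt_cons, if_pos (by simp), pvCnt_cons_ne_one '0' ('1' :: t) (by decide)]
      rw [show ((['1', '0'] : List Char) ++ '1' :: t) = '1' :: '0' :: '1' :: t from rfl, h4,
          show ((['1'] : List Char) ++ t) = '1' :: t from rfl]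
      ring

-- a 0/1-counting fold is the length of a filter
lemma pvFoldCount {α : Type} (L : List α) (P : α → Prop) [DecidablePred P] (a : Int) :
    L.foldl (fun acc i => if P i then acc + 1 else acc) a
      = a + ((L.filter (fun i => decide (P i))).length : Int) := by
  induction L generalizing a with
  | nil => simp
  | cons x t ih =>
    by_cases h : P x
    · rw [List.foldl_cons, if_pos h, ih, List.filter_cons, if_pos (decide_eq_true h),
        List.length_cons]
      push_cast
      ring
    · simp [List.foldl_cons, h, ih]

-- the window scan over positions counts pvCnt
lemma pvB_window (l : List Char) :
    (((List.range (l.length - 2)).filter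
        (fun k => decide ((l.drop k).take 3 = ['1', '0', '1']))).length : Int) = pvCnt l := by
  induction l with
  | nil => simp [pvCnt]
  | cons x t ih =>
    by_cases h2 : t.length ≤ 1
    · have h0 : (x :: t).length - 2 = 0 := by simp; omega
      rw [h0, pvCnt_short (x :: t) (by simp; omega)]
      simp
    · have h0 : (x :: t).length - 2 = (t.length - 2) + 1 := by simp; omega
      have hshift : (List.range (t.length - 2)).filter
            ((fun k => decide ((( x :: t).drop k).take 3 = ['1', '0', '1'])) ∘ Nat.succ)
          = (List.range (t.length - 2)).filter
            (fun k => decide ((t.drop k).take 3 = ['1', '0', '1'])) := by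
        apply List.filter_congr
        intro k _
        simp [Function.comp, List.drop_succ_cons]
      rw [h0, List.range_succ_eq_map, List.filter_cons, List.filter_map, hshift]
      by_cases hw : (x :: t).take 3 = ['1', '0', '1']
      · have hp : decide (((x :: t).drop 0).take 3 = ['1', '0', '1']) = true := by
          rw [List.drop_zero]; exact decide_eq_true hw
        rw [hp, if_pos rfl, List.length_cons, List.length_map, pvCnt_cons, if_pos hw]
        push_cast
        rw [ih]
        ring
      · have hp : decide (((x :: t).drop 0).take 3 = ['1', '0', '1']) = false := by
          rw [List.drop_zero]; exact decide_eq_false hw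
        rw [hp, if_neg (by simp), List.length_map, pvCnt_cons, if_neg hw, zero_add]
        exact ih

-- binary digits are only '0'/'1'
lemma pvToDigitsCore_binary (fuel n : Nat) (ds : List Char)
    (hds : ∀ c ∈ ds, c = '0' ∨ c = '1') :
    ∀ c ∈ Nat.toDigitsCore 2 fuel n ds, c = '0' ∨ c = '1' := by
  induction fuel generalizing n ds with
  | zero => simpa [Nat.toDigitsCore] using hds
  | succ f ih =>
    have hd : (n % 2).digitChar = '0' ∨ (n % 2).digitChar = '1' := by
      have h01 : n % 2 = 0 ∨ n % 2 = 1 := by omega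
      rcases h01 with h | h <;> simp [h, Nat.digitChar]
    have hds' : ∀ c ∈ (n % 2).digitChar :: ds, c = '0' ∨ c = '1' := by
      intro c hc
      rcases List.mem_cons.mp hc with h | h
      · subst h; exact hd
      · exact hds c h
    simp only [Nat.toDigitsCore]
    split
    · exact hds'
    · exact ih _ _ hds'

lemma pvToDigits_binary (n : Nat) : ∀ c ∈ Nat.toDigits 2 n, c = '0' ∨ c = '1' :=
  pvToDigitsCore_binary (n + 1) n [] (by simp)

-- the sliced string, at list level
lemma pvChars_eq (number : Int) :
    (PySem.Str.slice (PySem.Int.pyBin number) (some 2) none).toList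
      = (PySem.Int.toBinChars0b number).drop 2 := by
  rw [PySem.Str.toList_slice, PySem.Int.toList_pyBin, PySem.Chars.slice_eq_listSlice,
      show (2:Int) = ((2:Nat):Int) from rfl, PySem.List.slice_from_natCast]

-- A's port computes pvCnt of the sliced char list
lemma pvA_eq (number : Int) :
    get_coolness_count_of_number number
      = pvCnt ((PySem.Int.toBinChars0b number).drop 2) := by
  rw [get_coolness_count_of_number, pvChars_eq number]
  by_cases hneg : number < 0
  · have hch : (PySem.Int.toBinChars0b number).drop 2
        = 'b' :: Nat.toDigits 2 number.natAbs := by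
      simp [PySem.Int.toBinChars0b, hneg]
    rw [hch, List.foldl_cons,
        show pvStepA (0, []) 'b' = (0, []) from by simp [pvStepA],
        pvA_inv _ (pvToDigits_binary number.natAbs) 0 [] (Or.inl rfl),
        List.nil_append, pvCnt_cons_ne_one 'b' _ (by decide), zero_add]
  · have hch : (PySem.Int.toBinChars0b number).drop 2
        = Nat.toDigits 2 number.toNat := by
      simp [PySem.Int.toBinChars0b, hneg]
    rw [hch, pvA_inv _ (pvToDigits_binary number.toNat) 0 [] (Or.inl rfl),
        List.nil_append, zero_add]

-- B's port computes pvCnt of the string's char list (s generic)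
lemma pvB_core (s : String) (l : List Char) (hsl : s.toList = l) :
    (PySem.List.pyRange 0 (PySem.Str.len s - 2) 1).foldl
      (fun acc i => if PySem.Str.slice s (some i) (some (i + 3)) = "101" then acc + 1 else acc) 0
    = pvCnt l := by
  have hlen : PySem.Str.len s = (l.length : Int) := by
    rw [show PySem.Str.len s = (s.toList.length : Int) from by simp [PySem.Str.len], hsl]
  have h101 : ("101" : String).toList = ['1', '0', '1'] := rfl
  have hcond : ∀ k : Nat,
      (PySem.Str.slice s (some ((0:Int) + k)) (some ((0:Int) + k + 3)) = "101")
        = ((l.drop k).take 3 = ['1', '0', '1']) := by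
    intro k
    apply propext
    rw [← String.toList_inj, PySem.Str.toList_slice, hsl, PySem.Chars.slice_eq_listSlice,
        zero_add, PySem.List.slice_toNat l (Int.natCast_nonneg k) (by positivity)]
    have h3 : ((k:Int) + 3).toNat - ((k:Int)).toNat = 3 := by omega
    rw [h3, Int.toNat_natCast, h101]
  rw [hlen, PySem.List.pyRange_one, List.foldl_map]
  have hK : ((l.length : Int) - 2 - 0).toNat = l.length - 2 := by omega
  rw [hK]
  simp only [hcond]
  rw [pvFoldCount (List.range (l.length - 2))
        (fun k => (l.drop k).take 3 = ['1', '0', '1']) 0, zero_add, pvB_window l]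

-- B's port computes pvCnt of the sliced char list
lemma pvB_eq (number : Int) :
    get_coolness_count_of_number_alt number
      = pvCnt ((PySem.Int.toBinChars0b number).drop 2) := by
  rw [get_coolness_count_of_number_alt]
  exact pvB_core _ _ (pvChars_eq number)

-- ===== VERDICT (by name: the statement is the Claim_ definition above) =====
theorem get_coolness_count_of_number_spec : Claim_equal_get_coolness_count_of_number := by
  intro number _
  unfold Spec_get_coolness_count_of_number
  rw [pvA_eq, pvB_eq]
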